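-- pv_equiv track=rewrite | github.com/EysanSoft/expresion_regular_generica | metodos.py | definirCocatenacion
-- ===== SOURCE A (Python) =====
-- def definirRango(inicio, fin):
--     rango = ['(']
--     for c in range(ord(inicio), ord(fin)):  # Donde ord, devuelve el unicodigo de un caracter introducido.
--         rango.append(chr(c))
--         rango.append('|')
--     rango.append(fin)
--     return rango
--
-- def definirCocatenacion(expresion: str) -> list:
--     rango = []
--     i = 0
--     while i < len(expresion):
--         if expresion[i] == '[':
--             inicio = expresion[i + 1]
--             fin = expresion[i + 3]
--             rango += definirRango(inicio, fin)
--             i += 4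
--         else:
--             rango.append(expresion[i] if expresion[i] != ']' else ')')
--             if expresion[i] in {'(', '|'}:
--                 i += 1;
--                 continue
--             elif i < len(expresion) - 1:
--                 if expresion[i + 1] not in {'*', '?', '+', ')', '|', ']'}:
--                     rango.append('.')
--             i += 1
--     return rango
-- ===== SOURCE B (Python) =====
-- def definirCocatenacion(expresion: str) -> list:
--     # Pass 1: segment the expression (range segments and single-char segments),
--     # remembering each segment's original character and index.
--     n = len(expresion)
--     segs = []  # (tokens, original_char, original_index, is_range)
--     i = 0
--     while i < n:
--         c = expresion[i]
--         if c == '[':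
--             a, b = expresion[i + 1], expresion[i + 3]
--             toks = ['(']
--             for code in range(ord(a), ord(b)):
--                 toks.append(chr(code))
--                 toks.append('|')
--             toks.append(b)
--             segs.append((toks, c, i, True))
--             i += 4
--         else:
--             segs.append(([')' if c == ']' else c], c, i, False))
--             i += 1
--     # Pass 2: flatten, inserting '.' after a single-char segment when the
--     # following segment's original character calls for concatenation.
--     out = []
--     for k, (toks, c, idx, is_range) in enumerate(segs):
--         out.extend(toks)
--         if not is_range and c not in ('(', '|') and idx < n - 1:
--             nxt = segs[k + 1][1]
--             if nxt not in ('*', '?', '+', ')', '|', ']'):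
--                 out.append('.')
--     return out
-- ===== Notes on version B (the rewrite author's own statement) =====
-- stated objective: alternative
-- what changed: Replaces A's single interleaved scan (which decides dot insertion by peeking at expresion[i+1] while skipping 4 chars over ranges) with a two-pass decomposition: pass 1 segments the expression into range/single-char segments recording each segment's originating char and index, pass 2 flattens the segments and decides '.' insertion from the NEXT segment's original character.
-- outside the precondition, e.g. on definirCocatenacion('x[a-[]'): A returns ['x', '.', '(', '[', ')'], B returns ['x', '.', '(', '[', ')']; on definirCocatenacion('a[b'): A raises IndexError, B raises IndexError
import Mathlib
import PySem

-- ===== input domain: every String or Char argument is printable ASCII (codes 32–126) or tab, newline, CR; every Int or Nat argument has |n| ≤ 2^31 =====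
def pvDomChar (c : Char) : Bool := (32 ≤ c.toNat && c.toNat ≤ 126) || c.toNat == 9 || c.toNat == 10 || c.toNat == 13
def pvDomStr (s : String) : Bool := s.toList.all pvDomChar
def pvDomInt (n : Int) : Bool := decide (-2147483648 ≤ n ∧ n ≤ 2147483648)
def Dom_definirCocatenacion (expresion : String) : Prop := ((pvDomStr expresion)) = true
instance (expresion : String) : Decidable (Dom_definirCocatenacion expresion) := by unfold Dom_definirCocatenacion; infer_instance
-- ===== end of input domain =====

-- B re-decomposes A's interleaved scan into two passes (segment list, then flattening with
-- dot decisions read off the next segment's original character); same cost, no speed claim.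


-- ===== PORT A =====
-- definirRango: rango = ['(']; for c in range(ord(inicio), ord(fin)): append chr(c); append '|'; append fin
def definirRango (inicio fin : Char) : List String :=
  ((PySem.List.pyRange (inicio.toNat : Int) (fin.toNat : Int) 1).foldl
      (fun acc c => (acc ++ [String.ofList [Char.ofNat c.toNat]]) ++ ["|"]) ["("]) ++ [String.ofList [fin]]

-- the while loop of A, on the remaining suffix of expresion.toList
def loopA : List Char → List String
  | [] => []
  | '[' :: rest =>
      match rest with
      | a :: _ :: b :: rest' => definirRango a b ++ loopA rest'
      | _ => []          -- Python raises IndexError here; excluded by Pre_definirCocatenacion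
  | c :: rest =>
      let tok : String := if c = ']' then ")" else String.ofList [c]
      if c = '(' ∨ c = '|' then tok :: loopA rest
      else
        match rest with
        | [] => tok :: loopA rest
        | d :: _ =>
            if d = '*' ∨ d = '?' ∨ d = '+' ∨ d = ')' ∨ d = '|' ∨ d = ']' then tok :: loopA rest
            else tok :: "." :: loopA rest

def definirCocatenacion (expresion : String) : List String := loopA expresion.toList

-- ===== PORT B =====
-- pass 1: segments = (tokens, original char, original index, is_range)
def rangeToksB (a b : Char) : List String :=
  ((PySem.List.pyRange (a.toNat : Int) (b.toNat : Int) 1).foldl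
      (fun acc c => (acc ++ [String.ofList [Char.ofNat c.toNat]]) ++ ["|"]) ["("]) ++ [String.ofList [b]]

def segsB : List Char → Nat → List (List String × Char × Nat × Bool)
  | [], _ => []
  | '[' :: rest, i =>
      match rest with
      | a :: _ :: b :: rest' => (rangeToksB a b, '[', i, true) :: segsB rest' (i + 4)
      | _ => []          -- Python raises IndexError here; excluded by Pre_definirCocatenacion
  | c :: rest, i => ([if c = ']' then ")" else String.ofList [c]], c, i, false) :: segsB rest (i + 1)

-- pass 2: flatten, inserting "." from the NEXT segment's original character
def emitB (n : Nat) : List (List String × Char × Nat × Bool) → List String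
  | [] => []
  | (toks, c, idx, isR) :: rest =>
      toks ++
        (if isR = false ∧ ¬ (c = '(' ∨ c = '|') ∧ idx < n - 1 then
           match rest with
           | [] => []
           | (_, d, _, _) :: _ =>
               if d = '*' ∨ d = '?' ∨ d = '+' ∨ d = ')' ∨ d = '|' ∨ d = ']' then [] else ["."]
         else []) ++ emitB n rest

def definirCocatenacion_alt (expresion : String) : List String :=
  emitB expresion.toList.length (segsB expresion.toList 0)

-- ===== PRECONDITION & SPEC =====
-- Python A raises IndexError when a '[' it scans has fewer than 3 characters after it.
-- Pre_ excludes every '[' too close to the end (slightly stronger than A's raising set: it also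
-- excludes strings whose only late '[' sits inside a scanned range, e.g. "x[a-[]", where A returns).
def Pre_definirCocatenacion (expresion : String) : Prop :=
  ∀ j, j < expresion.toList.length → expresion.toList[j]! = '[' → j + 3 < expresion.toList.length
instance (expresion : String) : Decidable (Pre_definirCocatenacion expresion) := by
  unfold Pre_definirCocatenacion; infer_instance

def pvWitness_definirCocatenacion : String := "a[b-d]*"

def Spec_definirCocatenacion (expresion : String) (out : List String) : Prop := out = definirCocatenacion_alt expresion
instance (expresion : String) (out : List String) : Decidable (Spec_definirCocatenacion expresion out) := by unfold Spec_definirCocatenacion; infer_instance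

-- ===== CLAIM (what is proved, stated in full; the proofs are below) =====
def Claim_equal_definirCocatenacion : Prop := ∀ (expresion : String), Dom_definirCocatenacion expresion → Pre_definirCocatenacion expresion → Spec_definirCocatenacion expresion (definirCocatenacion expresion)

-- ===== LEMMAS AND PROOFS =====

-- list-level version of the precondition, stable under the suffix recursion
def OkL (l : List Char) : Prop := ∀ j, j < l.length → l[j]! = '[' → j + 3 < l.length

theorem okL_tail {c : Char} {l : List Char} (h : OkL (c :: l)) : OkL l := by
  intro j hj hget
  have := h (j + 1) (by simpa using Nat.succ_lt_succ hj) (by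
    simpa [List.getElem!_cons_succ] using hget)
  simpa using this

theorem okL_head_lbrack {l : List Char} (h : OkL ('[' :: l)) : 3 ≤ l.length := by
  have := h 0 (by simp) (by simp)
  simpa using this

theorem okL_drop3 {a x b : Char} {l : List Char} (h : OkL ('[' :: a :: x :: b :: l)) : OkL l :=
  okL_tail (okL_tail (okL_tail (okL_tail h)))

theorem rangeToksB_eq (a b : Char) : rangeToksB a b = definirRango a b := rfl

theorem segsB_cons {c : Char} (h : ¬ c = '[') (r : List Char) (i : Nat) :
    segsB (c :: r) i
      = ([if c = ']' then ")" else String.ofList [c]], c, i, false) :: segsB r (i + 1) := by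
  cases r <;> simp_all [segsB]

-- under OkL, segsB of a nonempty list produces a first segment carrying the head character
theorem segsB_head_char {d : Char} {r : List Char} (h : OkL (d :: r)) (i : Nat) :
    ∃ s t, segsB (d :: r) i = s :: t ∧ s.2.1 = d := by
  by_cases hd : d = '['
  · subst hd
    have h3 := okL_head_lbrack h
    match r, h3 with
    | a :: x :: b :: r', _ =>
        exact ⟨(rangeToksB a b, '[', i, true), segsB r' (i + 4), rfl, rfl⟩
  · exact ⟨([if d = ']' then ")" else String.ofList [d]], d, i, false), segsB r (i + 1),
      segsB_cons hd r i, rfl⟩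

-- main invariant: the interleaved scan equals the two-pass pipeline on any Ok suffix
theorem loop_eq (l : List Char) : ∀ i n, OkL l → n = i + l.length →
    loopA l = emitB n (segsB l i) := by
  induction l using loopA.induct with
  | case1 => intro i n _ _; simp [loopA, segsB, emitB]
  | case2 a x b rest' ih =>
      intro i n hok hn
      simp only [loopA, segsB, emitB, rangeToksB_eq]
      rw [ih (i + 4) n (okL_drop3 hok) (by simp at hn; omega)]
      simp
  | case3 rest hno =>
      -- '[' with fewer than 3 following characters: impossible under OkL
      intro i n hok hn
      have h3 := okL_head_lbrack hok
      match rest, h3, hno with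
      | a :: x :: b :: r', _, hno => exact absurd rfl (hno a x b r')
      | [], h3, _ => simp at h3
      | [a], h3, _ => simp at h3
      | [a, x], h3, _ => simp at h3
  | case4 c rest hlb hcond ih =>
      -- c in {'(','|'}: no dot logic at all
      intro i n hok hn
      rw [segsB_cons hlb rest i]
      simp only [emitB]
      rw [← ih (i + 1) n (okL_tail hok) (by simp at hn ⊢; omega)]
      cases rest <;> simp [loopA, hcond]
  | case5 c hlb hcond ih =>
      -- last character of the expression: dot suppressed by the index test
      intro i n hok hn
      have hend : ¬ (i < n - 1) := by simp at hn; omega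
      rw [segsB_cons hlb [] i]
      simp [loopA, segsB, emitB, hcond, hend]
  | case6 c hlb hcond d tail hd ih =>
      -- next original char suppresses the dot
      intro i n hok hn
      have hlt : i < n - 1 := by simp at hn; omega
      obtain ⟨s, t, hseg, hchar⟩ := segsB_head_char (okL_tail hok) (i + 1)
      have ih' := ih (i + 1) n (okL_tail hok) (by simp at hn ⊢; omega)
      rw [segsB_cons hlb (d :: tail) i]
      simp only [loopA, emitB, ih', hseg]
      simp [hcond, hd, hlt, hchar]
  | case7 c hlb hcond d tail hd ih =>
      -- dot inserted
      intro i n hok hn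
      have hlt : i < n - 1 := by simp at hn; omega
      obtain ⟨s, t, hseg, hchar⟩ := segsB_head_char (okL_tail hok) (i + 1)
      have ih' := ih (i + 1) n (okL_tail hok) (by simp at hn ⊢; omega)
      rw [segsB_cons hlb (d :: tail) i]
      simp only [loopA, emitB, ih', hseg]
      simp [hcond, hd, hlt, hchar]

-- ===== VERDICT (by name: the statement is the Claim_ definition above) =====
theorem definirCocatenacion_spec : Claim_equal_definirCocatenacion := by
  intro e _ hpre
  unfold Spec_definirCocatenacion definirCocatenacion definirCocatenacion_alt
  exact loop_eq e.toList 0 e.toList.length hpre (by simp)
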